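-- pv_equiv track=rewrite | github.com/mmoneib/python-laboratory | list__actions.py | obfuscate_by_sequence
-- ===== SOURCE A (Python) =====
-- def obfuscate_by_sequence(originalList, sequence):
--   tmpOriginalList=originalList
--   obfuscatedList=[]
--   while len(obfuscatedList) < len(tmpOriginalList):
--     for i in sequence:
--       index=int(i)
--       if (index > len(tmpOriginalList)-1):
--         index=len(tmpOriginalList)-1
--       if (index < 0 ):
--         break
--       obfuscatedList.append(tmpOriginalList[index])
--       tmpOriginalList.pop(index)
--   return obfuscatedList
-- ===== SOURCE B (Python) =====
-- # B: order-statistics tournament tree (select k-th alive element and delete in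
-- # O(log n)) instead of A's repeated list.pop(index) (O(n) per pop).
-- # Note: A mutates originalList in place (pops from it); B does not — the
-- # equivalence proved is about the return value only.
--
-- def _build(xs):
--     # leaf: [cnt, value]; node: [cnt, left, right]; cnt = number of alive elems
--     if len(xs) == 1:
--         return [1, xs[0]]
--     m = len(xs) // 2
--     return [len(xs), _build(xs[:m]), _build(xs[m:])]
--
-- def _select(t, k):
--     # return (k-th alive value, tree with that element deleted); pure
--     if len(t) == 2:
--         return t[1], [0, t[1]]
--     cl = t[1][0]
--     if k < cl:
--         v, l2 = _select(t[1], k)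
--         return v, [t[0] - 1, l2, t[2]]
--     v, r2 = _select(t[2], k - cl)
--     return v, [t[0] - 1, t[1], r2]
--
-- def obfuscate_by_sequence(originalList, sequence):
--     produced = []
--     if not originalList:
--         return produced
--     t = _build(originalList)
--     while len(produced) < t[0]:
--         for i in sequence:
--             alive = t[0]
--             index = int(i)
--             if index > alive - 1:
--                 index = alive - 1
--             if index < 0:
--                 break
--             v, t = _select(t, index)
--             produced.append(v)
--     return produced
-- ===== Notes on version B (the rewrite author's own statement) =====
-- stated objective: alternative
-- what changed: B replaces A's repeated list.pop(index) on a shrinking Python list with an order-statistics tournament tree that selects and deletes the k-th remaining element in O(log n) per step; A also mutates originalList in place while B leaves it untouched (return values agree).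
import Mathlib
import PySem

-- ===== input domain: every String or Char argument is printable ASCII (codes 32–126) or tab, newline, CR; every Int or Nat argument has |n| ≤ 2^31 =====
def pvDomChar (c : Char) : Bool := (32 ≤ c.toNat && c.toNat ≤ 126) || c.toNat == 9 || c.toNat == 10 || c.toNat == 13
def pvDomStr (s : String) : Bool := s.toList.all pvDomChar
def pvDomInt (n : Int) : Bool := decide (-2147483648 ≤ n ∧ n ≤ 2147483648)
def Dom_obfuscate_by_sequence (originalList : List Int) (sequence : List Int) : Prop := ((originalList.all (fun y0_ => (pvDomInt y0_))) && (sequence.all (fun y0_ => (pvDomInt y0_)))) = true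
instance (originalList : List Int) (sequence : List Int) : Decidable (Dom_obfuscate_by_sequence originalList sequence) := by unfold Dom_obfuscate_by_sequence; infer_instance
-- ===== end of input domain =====

-- B replaces A's repeated list.pop(index) with an order-statistics tournament tree
-- (select k-th alive element and delete); note A mutates originalList in place
-- (pops from it), B does not: the claim is about the return value only.

-- ===== PORT A =====
-- one pass of the inner 'for i in sequence' loop; returns (tmpOriginalList, obfuscatedList)
def aPass (tmp : List Int) (obf : List Int) : List Int → List Int × List Int
  | [] => (tmp, obf)
  | i :: rest =>
    let index : Int := i
    let index := if index > (tmp.length : Int) - 1 then (tmp.length : Int) - 1 else index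
    if index < 0 then (tmp, obf)        -- break
    else
      match PySem.List.pyGet? tmp index, PySem.List.pop? tmp index with
      | some v, some p => aPass p.2 (obf ++ [v]) rest
      | _, _ => (tmp, obf)              -- unreachable: 0 ≤ index ≤ len-1

-- the 'while' loop; fuel = originalList.length + 1 outer iterations is exact on
-- every input where the Python terminates (each executed pass pops ≥ 1 element,
-- so at most originalList.length passes run)
def aLoop (seq : List Int) : Nat → List Int → List Int → List Int
  | 0, _, obf => obf
  | fuel + 1, tmp, obf =>
    if obf.length < tmp.length then
      let p := aPass tmp obf seq
      aLoop seq fuel p.1 p.2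
    else obf

def obfuscate_by_sequence (originalList : List Int) (sequence : List Int) : List Int :=
  aLoop sequence (originalList.length + 1) originalList []

-- ===== PORT B =====
-- leaf cnt v ~ Python [cnt, v]; node cnt l r ~ Python [cnt, l, r]
inductive PTree where
  | leaf (cnt : Nat) (v : Int)
  | node (cnt : Nat) (l : PTree) (r : PTree)
deriving DecidableEq, Repr

def PTree.count : PTree → Nat
  | .leaf c _ => c
  | .node c _ _ => c

def buildT : List Int → PTree
  | [] => .leaf 0 0                     -- unreachable: B guards the empty list
  | [x] => .leaf 1 x
  | x :: y :: rest =>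
    let xs := x :: y :: rest
    let m := xs.length / 2
    .node xs.length (buildT (xs.take m)) (buildT (xs.drop m))
termination_by xs => xs.length
decreasing_by
  · simp [List.length_take]; omega
  · simp [List.length_drop]; omega

def selectT : PTree → Nat → Int × PTree
  | .leaf _ v, _ => (v, .leaf 0 v)
  | .node c l r, k =>
    let cl := l.count
    if k < cl then
      let p := selectT l k
      (p.1, .node (c - 1) p.2 r)
    else
      let p := selectT r (k - cl)
      (p.1, .node (c - 1) l p.2)

-- one pass of B's inner 'for i in sequence' loop; returns (t, produced)
def bPass (t : PTree) (obf : List Int) : List Int → PTree × List Int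
  | [] => (t, obf)
  | i :: rest =>
    let alive : Int := t.count
    let index : Int := i
    let index := if index > alive - 1 then alive - 1 else index
    if index < 0 then (t, obf)          -- break
    else
      let p := selectT t index.toNat
      bPass p.2 (obf ++ [p.1]) rest

-- B's 'while' loop, same fuel device as A's port (exact where the Python terminates)
def bLoop (seq : List Int) : Nat → PTree → List Int → List Int
  | 0, _, obf => obf
  | fuel + 1, t, obf =>
    if obf.length < t.count then
      let p := bPass t obf seq
      bLoop seq fuel p.1 p.2
    else obf

def obfuscate_by_sequence_alt (originalList : List Int) (sequence : List Int) : List Int :=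
  match originalList with
  | [] => []
  | _ => bLoop sequence (originalList.length + 1) (buildT originalList) []

-- ===== PRECONDITION & SPEC =====
def Spec_obfuscate_by_sequence (originalList : List Int) (sequence : List Int) (out : List Int) : Prop := out = obfuscate_by_sequence_alt originalList sequence
instance (originalList : List Int) (sequence : List Int) (out : List Int) : Decidable (Spec_obfuscate_by_sequence originalList sequence out) := by unfold Spec_obfuscate_by_sequence; infer_instance

-- ===== CLAIM (what is proved, stated in full; the proofs are below) =====
def Claim_equal_obfuscate_by_sequence : Prop := ∀ (originalList : List Int) (sequence : List Int), Dom_obfuscate_by_sequence originalList sequence → Spec_obfuscate_by_sequence originalList sequence (obfuscate_by_sequence originalList sequence)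

-- ===== LEMMAS AND PROOFS =====

-- alive elements of a tree, in order
def toL : PTree → List Int
  | .leaf c v => if c = 0 then [] else [v]
  | .node _ l r => toL l ++ toL r

-- well-formedness: stored counts are correct (leaf counts are 0 or 1)
def WF : PTree → Prop
  | .leaf c _ => c ≤ 1
  | .node c l r => WF l ∧ WF r ∧ c = l.count + r.count

theorem selectT_node (c : Nat) (l r : PTree) (k : Nat) :
    selectT (.node c l r) k =
      if k < l.count then ((selectT l k).1, .node (c - 1) (selectT l k).2 r)
      else ((selectT r (k - l.count)).1, .node (c - 1) l (selectT r (k - l.count)).2) := rfl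

theorem count_toL (t : PTree) (h : WF t) : (toL t).length = t.count := by
  induction t with
  | leaf c v => unfold WF at h; unfold toL PTree.count; split <;> simp <;> omega
  | node c l r ihl ihr =>
    obtain ⟨hl, hr, hc⟩ := h
    simp [toL, PTree.count, hc, ihl hl, ihr hr]

theorem selectT_spec (t : PTree) (k : Nat) (h : WF t) (hk : k < t.count) :
    (selectT t k).1 = (toL t).getD k 0 ∧ toL (selectT t k).2 = (toL t).eraseIdx k ∧
    WF (selectT t k).2 ∧ (selectT t k).2.count = t.count - 1 := by
  induction t generalizing k with
  | leaf c v =>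
    unfold WF at h
    have hc : c = 1 := by simp [PTree.count] at hk; omega
    have hk0 : k = 0 := by simp [PTree.count, hc] at hk; omega
    subst hc; subst hk0
    simp [selectT, toL, WF, PTree.count]
  | node c l r ihl ihr =>
    obtain ⟨hl, hr, hc⟩ := h
    have hll := count_toL l hl
    have hlr := count_toL r hr
    simp only [PTree.count] at hk
    rw [selectT_node]
    by_cases hlt : k < l.count
    · obtain ⟨h1, h2, h3, h4⟩ := ihl k hl hlt
      rw [if_pos hlt]
      simp only [toL]
      refine ⟨?_, ?_, ?_, by simp [PTree.count]⟩
      · rw [h1, show (toL l ++ toL r).getD k 0 = (toL l).getD k 0 from by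
          rw [List.getD_eq_getElem?_getD, List.getElem?_append_left (by omega),
            ← List.getD_eq_getElem?_getD]]
      · rw [h2, List.eraseIdx_append_of_lt_length (by omega)]
      · show WF (.node (c - 1) (selectT l k).2 r)
        exact ⟨h3, hr, by simp only [PTree.count] at *; omega⟩
    · have hk2 : k - l.count < r.count := by omega
      obtain ⟨h1, h2, h3, h4⟩ := ihr (k - l.count) hr hk2
      rw [if_neg hlt]
      simp only [toL]
      refine ⟨?_, ?_, ?_, by simp [PTree.count]⟩
      · rw [h1, show (toL l ++ toL r).getD k 0 = (toL r).getD (k - l.count) 0 from by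
          rw [List.getD_eq_getElem?_getD, List.getElem?_append_right (by omega),
            ← List.getD_eq_getElem?_getD, hll]]
      · rw [h2, List.eraseIdx_append_of_length_le (by omega), hll]
      · show WF (.node (c - 1) l (selectT r (k - l.count)).2)
        exact ⟨hl, h3, by simp only [PTree.count] at *; omega⟩

theorem buildT_spec (xs : List Int) : toL (buildT xs) = xs ∧ WF (buildT xs) := by
  induction xs using buildT.induct with
  | case1 => simp [buildT, toL, WF]
  | case2 x => simp [buildT, toL, WF]
  | case3 x y rest xs m ih1 ih2 =>
    obtain ⟨t1, w1⟩ := ih1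
    obtain ⟨t2, w2⟩ := ih2
    have c1 := count_toL _ w1
    have c2 := count_toL _ w2
    rw [t1] at c1
    rw [t2] at c2
    refine ⟨?_, ?_⟩
    · simp only [buildT, toL]
      rw [t1, t2]
      exact List.take_append_drop _ _
    · simp only [buildT, WF]
      refine ⟨w1, w2, ?_⟩
      rw [← c1, ← c2]
      have hm : m = xs.length / 2 := rfl
      have hxs : xs.length = rest.length + 2 := rfl
      simp only [List.length_take, List.length_drop, List.length_cons]
      omega

theorem pass_sim (seq : List Int) (t : PTree) (tmp obf : List Int)
    (hw : WF t) (ht : toL t = tmp) :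
    aPass tmp obf seq = (toL (bPass t obf seq).1, (bPass t obf seq).2) ∧
    WF (bPass t obf seq).1 := by
  induction seq generalizing t tmp obf with
  | nil => exact ⟨by simp [aPass, bPass, ht], by simpa [bPass] using hw⟩
  | cons i rest ih =>
    have hlen0 : tmp.length = t.count := by rw [← ht]; exact count_toL t hw
    have hlen : (tmp.length : Int) = (t.count : Int) := by exact_mod_cast hlen0
    simp only [aPass, bPass, ← hlen]
    set index : Int := if i > (tmp.length : Int) - 1 then (tmp.length : Int) - 1 else i with hidx
    by_cases hneg : index < 0
    · simp only [hneg, if_pos]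
      exact ⟨by rw [ht], hw⟩
    · -- index in range: 0 ≤ index ≤ len - 1
      have h0 : 0 ≤ index := by omega
      have hlt : index < (tmp.length : Int) := by
        by_cases hbig : i > (tmp.length : Int) - 1 <;> simp [hidx, hbig] <;> omega
      have hnat : index.toNat < tmp.length := by omega
      have hknat : index.toNat < t.count := by omega
      obtain ⟨s1, s2, s3, s4⟩ := selectT_spec t index.toNat hw hknat
      rw [if_neg hneg]
      rw [if_neg hneg]
      rw [PySem.List.pyGet?_eq_some_getElem tmp h0 hlt]
      have hpop : PySem.List.pop? tmp index = some (tmp[index.toNat], tmp.eraseIdx index.toNat) := by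
        have h := PySem.List.pop?_natCast tmp index.toNat hnat
        rwa [Int.toNat_of_nonneg h0] at h
      rw [hpop]
      have hval : (selectT t index.toNat).1 = tmp[index.toNat] := by
        rw [s1, ht, List.getD_eq_getElem?_getD, List.getElem?_eq_getElem hnat]; rfl
      rw [hval]
      exact ih _ _ _ s3 (by rw [s2, ht])

theorem loop_sim (seq : List Int) (fuel : Nat) (t : PTree) (tmp obf : List Int)
    (hw : WF t) (ht : toL t = tmp) :
    aLoop seq fuel tmp obf = bLoop seq fuel t obf := by
  induction fuel generalizing t tmp obf with
  | zero => simp [aLoop, bLoop]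
  | succ n ih =>
    have hlen : tmp.length = t.count := by rw [← ht]; exact count_toL t hw
    simp only [aLoop, bLoop, hlen]
    split
    · obtain ⟨hp, hwf⟩ := pass_sim seq t tmp obf hw ht
      rw [hp]
      exact ih _ _ _ hwf rfl
    · rfl

-- ===== VERDICT (by name: the statement is the Claim_ definition above) =====
theorem obfuscate_by_sequence_spec : Claim_equal_obfuscate_by_sequence := by
  intro ol seq _
  unfold Spec_obfuscate_by_sequence obfuscate_by_sequence obfuscate_by_sequence_alt
  match ol with
  | [] => simp [aLoop]
  | x :: xs =>
    obtain ⟨ht, hw⟩ := buildT_spec (x :: xs)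
    exact loop_sim seq _ _ _ [] hw ht
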